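-- pv_equiv track=rewrite | github.com/pypi-data/pypi-mirror-207 | packages/Xhpc/Xhpc-2.9.1.tar.gz/Xhpc-2.9.1/Xhpc/relocate.py | get_min_folders
-- ===== SOURCE A (Python) =====
-- import itertools
--
-- def get_min_folders(folders: set, included: set) -> set:
--     """Reduce the set of folder to that which is most basal so that
--
--     Parameters
--     ----------
--     folders : set
--         Sets of existing folder that will be moved in scratch
--     included : set
--         Paths to the folders that the user passed to option `--p-include`
--
--     Returns
--     -------
--     min_folders : set
--         Minimum set of existing folders to contain all folders passed in command
--     """
--     # Get the folders entailed within others (so that these need not be moved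
--     # specifically, they will be moved as being within these "others")
--     min_folders, exclude = set(), set()
--     for f1, f2 in itertools.combinations(sorted(folders), 2):
--         if f1 != f2 and f1 in f2:
--             exclude.add(f2)
--
--     # Expand the collection of folders with those entailed within the
--     # folders passed to option `--p-include` (same reason)
--     for f1 in folders:
--         for f2 in included:
--             if f2 in f1:
--                 exclude.add(f1)
--
--     # Actual reduction to remove all folders contained within a broader path
--     min_folders = folders.difference(exclude) | included
--     return min_folders
-- ===== SOURCE B (Python) =====
-- def get_min_folders(folders: set, included: set) -> set:
--     """Single sweep over the folders in sorted order, maintaining only the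
--     basal folders found so far: each folder is tested against the included
--     paths and against the already-kept basal folders only (excluded folders
--     never need to be consulted again, since whatever they would exclude is
--     already excluded by the basal folder inside them)."""
--     basal = []
--     for f in sorted(folders):
--         if any(i in f for i in included):
--             continue
--         if any(b in f for b in basal):
--             continue
--         basal.append(f)
--     keep = set(basal)
--     return {f for f in folders if f in keep} | set(included)
-- ===== Notes on version B (the rewrite author's own statement) =====
-- stated objective: faster
-- what changed: Replaces A's materialised all-pairs itertools.combinations pass plus full exclusion set with a single sweep over the folders in sorted order that maintains only the basal folders kept so far and tests each folder against those kept folders alone (correct because the lexicographically least folder inside f is itself basal).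
import Mathlib
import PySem

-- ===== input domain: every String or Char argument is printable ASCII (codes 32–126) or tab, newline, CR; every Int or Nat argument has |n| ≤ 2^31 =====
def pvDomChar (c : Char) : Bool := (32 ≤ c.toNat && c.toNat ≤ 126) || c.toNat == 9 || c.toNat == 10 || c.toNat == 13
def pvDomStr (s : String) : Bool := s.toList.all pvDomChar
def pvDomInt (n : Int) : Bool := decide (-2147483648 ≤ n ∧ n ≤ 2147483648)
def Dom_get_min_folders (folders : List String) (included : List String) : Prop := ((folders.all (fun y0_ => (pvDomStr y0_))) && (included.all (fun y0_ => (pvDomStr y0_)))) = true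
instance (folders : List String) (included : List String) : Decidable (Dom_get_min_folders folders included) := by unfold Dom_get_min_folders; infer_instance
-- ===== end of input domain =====

-- B replaces A's all-pairs combinations pass and full exclusion set by a single
-- sweep over the folders in sorted order that maintains only the basal folders
-- kept so far and tests each folder against those kept folders alone.

-- ===== PORT A =====
def get_min_folders (folders : List String) (included : List String) : List String :=
  -- min_folders, exclude = set(), set(); for f1, f2 in itertools.combinations(sorted(folders), 2): ...
  let exclude1 : PySem.Set String :=
    (PySem.List.combinations (PySem.List.sorted folders (fun x => x)) 2).foldl
      (fun ex p =>
        match p with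
        | [f1, f2] => if f1 ≠ f2 ∧ PySem.Str.isIn f1 f2 then PySem.Set.add ex f2 else ex
        | _ => ex)
      PySem.Set.empty
  -- for f1 in folders: for f2 in included: if f2 in f1: exclude.add(f1)
  let exclude2 : PySem.Set String :=
    folders.foldl
      (fun ex f1 =>
        included.foldl (fun ex f2 => if PySem.Str.isIn f2 f1 then PySem.Set.add ex f1 else ex) ex)
      exclude1
  -- return folders.difference(exclude) | included
  PySem.Set.union (PySem.Set.diff folders exclude2) included

-- ===== PORT B =====
def get_min_folders_alt (folders : List String) (included : List String) : List String :=
  -- basal = []; for f in sorted(folders): ... basal.append(f)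
  let basal : List String :=
    (PySem.List.sorted folders (fun x => x)).foldl
      (fun basal f =>
        if included.any (fun i => PySem.Str.isIn i f) then basal
        else if basal.any (fun b => PySem.Str.isIn b f) then basal
        else basal ++ [f])
      []
  -- keep = set(basal); return {f for f in folders if f in keep} | set(included)
  let keep : PySem.Set String := PySem.Set.ofList basal
  PySem.Set.union (PySem.Set.ofList (folders.filter (fun f => PySem.Set.contains keep f))) included

-- ===== PRECONDITION & SPEC =====
-- The Python arguments are sets; Pre_ states the List encodings are valid set
-- representations (distinct elements), as the type convention requires.
def Pre_get_min_folders (folders : List String) (included : List String) : Prop :=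
  folders.Nodup ∧ included.Nodup
instance (folders : List String) (included : List String) : Decidable (Pre_get_min_folders folders included) := by unfold Pre_get_min_folders; infer_instance

def pvWitness_get_min_folders : List String × List String := (["/a", "/a/b", "/c"], ["/a"])

def Spec_get_min_folders (folders : List String) (included : List String) (out : List String) : Prop := out = get_min_folders_alt folders included
instance (folders : List String) (included : List String) (out : List String) : Decidable (Spec_get_min_folders folders included out) := by unfold Spec_get_min_folders; infer_instance

-- ===== CLAIM (what is proved, stated in full; the proofs are below) =====
def Claim_equal_get_min_folders : Prop := ∀ (folders : List String) (included : List String), Dom_get_min_folders folders included → Pre_get_min_folders folders included → Spec_get_min_folders folders included (get_min_folders folders included)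

-- ===== LEMMAS AND PROOFS =====

-- "f is basal": no included path is inside f, and no smaller folder is inside f
def pvKeep (folders included : List String) (f : String) : Prop :=
  (¬ ∃ i ∈ included, PySem.Str.isIn i f = true) ∧
  (¬ ∃ g ∈ folders, g < f ∧ PySem.Str.isIn g f = true)

theorem isIn_trans {a b c : String} (h1 : PySem.Str.isIn a b = true)
    (h2 : PySem.Str.isIn b c = true) : PySem.Str.isIn a c = true := by
  rw [PySem.Str.isIn_iff_infix] at h1 h2 ⊢
  exact h1.trans h2

-- the lexicographically least folder strictly inside f is itself basal
theorem exists_kept_excluder (folders included : List String) (f : String)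
    (hninc : ¬ ∃ i ∈ included, PySem.Str.isIn i f = true)
    (hex : ∃ g ∈ folders, g < f ∧ PySem.Str.isIn g f = true) :
    ∃ g ∈ folders, g < f ∧ PySem.Str.isIn g f = true ∧ pvKeep folders included g := by
  obtain ⟨g0, hg0, hlt0, hin0⟩ := hex
  have hS : g0 ∈ folders.filter (fun g => decide (g < f) && PySem.Str.isIn g f) :=
    List.mem_filter.mpr ⟨hg0, by rw [Bool.and_eq_true, decide_eq_true_eq]; exact ⟨hlt0, hin0⟩⟩
  have hne : folders.filter (fun g => decide (g < f) && PySem.Str.isIn g f) ≠ [] :=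
    List.ne_nil_of_mem hS
  obtain ⟨a, ha⟩ := Option.isSome_iff_exists.mp (List.isSome_min?_of_ne_nil hne)
  obtain ⟨hmem, hmin⟩ := List.min?_eq_some_iff.mp ha
  rw [List.mem_filter] at hmem
  obtain ⟨haf, hcond⟩ := hmem
  simp only [Bool.and_eq_true, decide_eq_true_eq] at hcond
  refine ⟨a, haf, hcond.1, hcond.2, ?_, ?_⟩
  · rintro ⟨i, hi, hiin⟩
    exact hninc ⟨i, hi, isIn_trans hiin hcond.2⟩
  · rintro ⟨h, hh, hha, hhin⟩
    have hinS : h ∈ folders.filter (fun g => decide (g < f) && PySem.Str.isIn g f) :=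
      List.mem_filter.mpr ⟨hh, by
        rw [Bool.and_eq_true, decide_eq_true_eq]
        exact ⟨lt_trans hha hcond.1, isIn_trans hhin hcond.2⟩⟩
    exact absurd (hmin h hinS) (not_le.mpr hha)

-- invariant of B's sweep: after processing the sorted prefix P, the accumulator
-- holds exactly the basal folders of P
theorem basal_fold_mem (folders included : List String)
    (hlt : (PySem.List.sorted folders (fun x => x)).Pairwise (· < ·)) :
    ∀ (l P acc : List String),
      PySem.List.sorted folders (fun x => x) = P ++ l →
      (∀ y, y ∈ acc ↔ y ∈ P ∧ pvKeep folders included y) →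
      ∀ y, (y ∈ l.foldl
          (fun basal f =>
            if included.any (fun i => PySem.Str.isIn i f) then basal
            else if basal.any (fun b => PySem.Str.isIn b f) then basal
            else basal ++ [f])
          acc ↔ (y ∈ P ∨ y ∈ l) ∧ pvKeep folders included y) := by
  have hperm := PySem.List.sorted_perm folders (fun x => x) false
  intro l
  induction l with
  | nil =>
    intro P acc hsort hacc y
    simp only [List.foldl_nil, hacc, List.not_mem_nil, or_false]
  | cons f t ih =>
    intro P acc hsort hacc y
    have hpw : (P ++ f :: t).Pairwise (· < ·) := hsort ▸ hlt
    have hPlt : ∀ p ∈ P, p < f := fun p hp =>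
      (List.pairwise_append.mp hpw).2.2 p hp f (List.mem_cons_self ..)
    have hft : ∀ x ∈ t, f < x := by
      have := (List.pairwise_append.mp hpw).2.1
      exact (List.pairwise_cons.mp this).1
    have hmemF : ∀ x, x ∈ P ++ f :: t ↔ x ∈ folders := fun x => by
      rw [← hsort]; exact hperm.mem_iff
    have hsort' : PySem.List.sorted folders (fun x => x) = (P ++ [f]) ++ t := by
      rw [hsort, List.append_assoc]; rfl
    -- the step: characterise the new accumulator
    by_cases h1 : included.any (fun i => PySem.Str.isIn i f) = true
    · -- f contains an included path: dropped, and ¬ pvKeep f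
      have hnk : ¬ pvKeep folders included f := by
        rw [List.any_eq_true] at h1
        obtain ⟨i, hi, hii⟩ := h1
        exact fun hk => hk.1 ⟨i, hi, hii⟩
      have hacc' : ∀ y, y ∈ acc ↔ y ∈ P ++ [f] ∧ pvKeep folders included y := by
        intro y
        rw [hacc]
        constructor
        · rintro ⟨hP, hk⟩; exact ⟨List.mem_append_left _ hP, hk⟩
        · rintro ⟨hPf, hk⟩
          rcases List.mem_append.mp hPf with hP | hf
          · exact ⟨hP, hk⟩
          · rw [List.mem_singleton] at hf; subst hf; exact absurd hk hnk
      have := ih (P ++ [f]) acc hsort' hacc' y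
      rw [List.foldl_cons, if_pos h1, this]
      simp only [List.mem_append, List.mem_cons]
      tauto
    · by_cases h2 : acc.any (fun b => PySem.Str.isIn b f) = true
      · -- some kept basal folder is inside f: dropped, and ¬ pvKeep f
        have hnk : ¬ pvKeep folders included f := by
          rw [List.any_eq_true] at h2
          obtain ⟨b, hb, hbin⟩ := h2
          obtain ⟨hbP, _⟩ := (hacc b).mp hb
          have hbF : b ∈ folders := (hmemF b).mp (List.mem_append_left _ hbP)
          exact fun hk => hk.2 ⟨b, hbF, hPlt b hbP, hbin⟩
        have hacc' : ∀ y, y ∈ acc ↔ y ∈ P ++ [f] ∧ pvKeep folders included y := by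
          intro y
          rw [hacc]
          constructor
          · rintro ⟨hP, hk⟩; exact ⟨List.mem_append_left _ hP, hk⟩
          · rintro ⟨hPf, hk⟩
            rcases List.mem_append.mp hPf with hP | hf
            · exact ⟨hP, hk⟩
            · rw [List.mem_singleton] at hf; subst hf; exact absurd hk hnk
        have := ih (P ++ [f]) acc hsort' hacc' y
        rw [List.foldl_cons, if_neg h1, if_pos h2, this]
        simp only [List.mem_append, List.mem_cons]
        tauto
      · -- f survives both tests: it is basal
        have hninc : ¬ ∃ i ∈ included, PySem.Str.isIn i f = true := by
          rintro ⟨i, hi, hii⟩; exact h1 (List.any_eq_true.mpr ⟨i, hi, hii⟩)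
        have hk : pvKeep folders included f := by
          refine ⟨hninc, ?_⟩
          intro hex
          obtain ⟨g, hgF, hglt, hgin, hgk⟩ :=
            exists_kept_excluder folders included f hninc hex
          have hgP : g ∈ P := by
            rcases List.mem_append.mp ((hmemF g).mpr hgF) with hP | hft'
            · exact hP
            · rcases List.mem_cons.mp hft' with rfl | hgt
              · exact absurd hglt (lt_irrefl _)
              · exact absurd (lt_trans (hft g hgt) hglt) (lt_irrefl _)
          have : g ∈ acc := (hacc g).mpr ⟨hgP, hgk⟩
          exact h2 (List.any_eq_true.mpr ⟨g, this, hgin⟩)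
        have hacc' : ∀ y, y ∈ acc ++ [f] ↔ y ∈ P ++ [f] ∧ pvKeep folders included y := by
          intro y
          rw [List.mem_append, hacc, List.mem_append]
          constructor
          · rintro (⟨hP, hky⟩ | hf)
            · exact ⟨Or.inl hP, hky⟩
            · rw [List.mem_singleton] at hf; subst hf
              exact ⟨Or.inr (List.mem_singleton.mpr rfl), hk⟩
          · rintro ⟨hP | hf, hky⟩
            · exact Or.inl ⟨hP, hky⟩
            · exact Or.inr hf
        have := ih (P ++ [f]) (acc ++ [f]) hsort' hacc' y
        rw [List.foldl_cons, if_neg h1, if_neg h2, this]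
        simp only [List.mem_append, List.mem_cons]
        tauto

-- B's basal list holds exactly the basal folders
theorem mem_basal (folders included : List String) (hf : folders.Nodup) (y : String) :
    (y ∈ (PySem.List.sorted folders (fun x => x)).foldl
        (fun basal f =>
          if included.any (fun i => PySem.Str.isIn i f) then basal
          else if basal.any (fun b => PySem.Str.isIn b f) then basal
          else basal ++ [f])
        [] ↔ y ∈ folders ∧ pvKeep folders included y) := by
  have hperm := PySem.List.sorted_perm folders (fun x => x) false
  have hnd : (PySem.List.sorted folders (fun x => x)).Nodup := hperm.nodup_iff.mpr hf
  have hlt : (PySem.List.sorted folders (fun x => x)).Pairwise (· < ·) :=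
    ((PySem.List.sorted_pairwise folders (fun x => x)).and hnd).imp
      (fun h => lt_of_le_of_ne h.1 h.2)
  have := basal_fold_mem folders included hlt
    (PySem.List.sorted folders (fun x => x)) [] [] rfl (by simp) y
  rw [this]
  simp [hperm.mem_iff]

-- ——— A-side characterisation (exclusion set) ———

-- membership in the inner `for f2 in included` fold
theorem mem_fold_inner (included : List String) (f1 : String) (ex : PySem.Set String) (y : String) :
    (y ∈ included.foldl (fun ex f2 => if PySem.Str.isIn f2 f1 then PySem.Set.add ex f1 else ex) ex) ↔
      y ∈ ex ∨ (y = f1 ∧ ∃ i ∈ included, PySem.Str.isIn i f1 = true) := by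
  induction included generalizing ex with
  | nil => simp
  | cons i t ih =>
    simp only [List.foldl_cons, ih, List.mem_cons]
    by_cases h : PySem.Str.isIn i f1 = true
    · rw [if_pos h]
      simp only [PySem.Set.mem_add]
      constructor
      · rintro ((hm | rfl) | ⟨rfl, j, hj, hjin⟩)
        · exact Or.inl hm
        · exact Or.inr ⟨rfl, i, Or.inl rfl, h⟩
        · exact Or.inr ⟨rfl, j, Or.inr hj, hjin⟩
      · rintro (hm | ⟨rfl, j, (rfl | hj), hjin⟩)
        · exact Or.inl (Or.inl hm)
        · exact Or.inl (Or.inr rfl)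
        · exact Or.inr ⟨rfl, j, hj, hjin⟩
    · rw [if_neg h]
      constructor
      · rintro (hm | ⟨rfl, j, hj, hjin⟩)
        · exact Or.inl hm
        · exact Or.inr ⟨rfl, j, Or.inr hj, hjin⟩
      · rintro (hm | ⟨rfl, j, (rfl | hj), hjin⟩)
        · exact Or.inl hm
        · exact absurd hjin h
        · exact Or.inr ⟨rfl, j, hj, hjin⟩

-- membership in the outer `for f1 in folders` fold
theorem mem_fold_outer (folders included : List String) (ex : PySem.Set String) (y : String) :
    (y ∈ folders.foldl
        (fun ex f1 =>
          included.foldl (fun ex f2 => if PySem.Str.isIn f2 f1 then PySem.Set.add ex f1 else ex) ex)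
        ex) ↔
      y ∈ ex ∨ (y ∈ folders ∧ ∃ i ∈ included, PySem.Str.isIn i y = true) := by
  induction folders generalizing ex with
  | nil => simp
  | cons f t ih =>
    simp only [List.foldl_cons, ih, mem_fold_inner, List.mem_cons]
    constructor
    · rintro ((hm | ⟨rfl, hi⟩) | h)
      · exact Or.inl hm
      · exact Or.inr ⟨Or.inl rfl, hi⟩
      · exact Or.inr ⟨Or.inr h.1, h.2⟩
    · rintro (hm | ⟨(rfl | hmem), hi⟩)
      · exact Or.inl (Or.inl hm)
      · exact Or.inl (Or.inr ⟨rfl, hi⟩)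
      · exact Or.inr ⟨hmem, hi⟩

-- membership in the fold over itertools.combinations(sorted(folders), 2)
theorem mem_fold_comb (l : List (List String)) (ex : PySem.Set String) (y : String) :
    (y ∈ l.foldl
        (fun ex p =>
          match p with
          | [f1, f2] => if f1 ≠ f2 ∧ PySem.Str.isIn f1 f2 then PySem.Set.add ex f2 else ex
          | _ => ex)
        ex) ↔
      y ∈ ex ∨ ∃ f1 f2, [f1, f2] ∈ l ∧ f1 ≠ f2 ∧ PySem.Str.isIn f1 f2 = true ∧ y = f2 := by
  induction l generalizing ex with
  | nil => simp
  | cons p t ih =>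
    simp only [List.foldl_cons, ih, List.mem_cons]
    have step :
        ∀ ex' : PySem.Set String,
          (y ∈ (match p with
            | [f1, f2] => if f1 ≠ f2 ∧ PySem.Str.isIn f1 f2 then PySem.Set.add ex' f2 else ex'
            | _ => ex')) ↔
            y ∈ ex' ∨ ∃ f1 f2, [f1, f2] = p ∧ f1 ≠ f2 ∧ PySem.Str.isIn f1 f2 = true ∧ y = f2 := by
      intro ex'
      match p with
      | [] => simp
      | [a] => simp
      | a :: b :: c :: r => simp
      | [a, b] =>
        show (y ∈ if a ≠ b ∧ PySem.Str.isIn a b then PySem.Set.add ex' b else ex') ↔ _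
        by_cases h : a ≠ b ∧ PySem.Str.isIn a b = true
        · rw [if_pos h]
          simp only [PySem.Set.mem_add]
          constructor
          · rintro (hm | rfl)
            · exact Or.inl hm
            · exact Or.inr ⟨a, y, rfl, h.1, h.2, rfl⟩
          · rintro (hm | ⟨f1, f2, heq, hne, hin, rfl⟩)
            · exact Or.inl hm
            · cases heq; exact Or.inr rfl
        · rw [if_neg h]
          constructor
          · exact fun hm => Or.inl hm
          · rintro (hm | ⟨f1, f2, heq, hne, hin, rfl⟩)
            · exact hm
            · cases heq; exact absurd ⟨hne, hin⟩ h
    simp only [step]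
    constructor
    · rintro ((hm | ⟨f1, f2, heq, hc⟩) | ⟨f1, f2, hmem, hc⟩)
      · exact Or.inl hm
      · exact Or.inr ⟨f1, f2, Or.inl heq, hc⟩
      · exact Or.inr ⟨f1, f2, Or.inr hmem, hc⟩
    · rintro (hm | ⟨f1, f2, (heq | hmem), hc⟩)
      · exact Or.inl (Or.inl hm)
      · exact Or.inl (Or.inr ⟨f1, f2, heq, hc⟩)
      · exact Or.inr ⟨f1, f2, hmem, hc⟩

-- a strictly sorted list contains the pair [a, b] as a sublist iff both occur and a < b
theorem pair_sublist_iff {l : List String} (hp : l.Pairwise (· < ·)) (a b : String) :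
    List.Sublist [a, b] l ↔ a ∈ l ∧ b ∈ l ∧ a < b := by
  constructor
  · intro hs
    have hab := hp.sublist hs
    simp only [List.pairwise_cons] at hab
    exact ⟨hs.subset (by simp), hs.subset (by simp), hab.1 b (by simp)⟩
  · rintro ⟨ha, hb, hlt⟩
    induction l with
    | nil => simp at ha
    | cons x t ih =>
      simp only [List.pairwise_cons] at hp
      rcases List.mem_cons.mp ha with rfl | hat
      · have hbt : b ∈ t := by
          rcases List.mem_cons.mp hb with rfl | h
          · exact absurd hlt (lt_irrefl _)
          · exact h
        exact (List.singleton_sublist.mpr hbt).cons₂ a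
      · have hbt : b ∈ t := by
          rcases List.mem_cons.mp hb with rfl | h
          · exact absurd (lt_trans (hp.1 a hat) hlt) (lt_irrefl _)
          · exact h
        exact (ih hp.2 hat hbt).cons x

-- the exclusion set of A holds exactly the folders that are NOT basal
theorem mem_exclude (folders included : List String) (hf : folders.Nodup) (f : String)
    (hmem : f ∈ folders) :
    (f ∈ folders.foldl
        (fun ex f1 =>
          included.foldl (fun ex f2 => if PySem.Str.isIn f2 f1 then PySem.Set.add ex f1 else ex) ex)
        ((PySem.List.combinations (PySem.List.sorted folders (fun x => x)) 2).foldl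
          (fun ex p =>
            match p with
            | [f1, f2] => if f1 ≠ f2 ∧ PySem.Str.isIn f1 f2 then PySem.Set.add ex f2 else ex
            | _ => ex)
          PySem.Set.empty)) ↔
      (∃ i ∈ included, PySem.Str.isIn i f = true) ∨
        (∃ g ∈ folders, g < f ∧ PySem.Str.isIn g f = true) := by
  have hperm := PySem.List.sorted_perm folders (fun x => x) false
  have hnd : (PySem.List.sorted folders (fun x => x)).Nodup := hperm.nodup_iff.mpr hf
  have hlt : (PySem.List.sorted folders (fun x => x)).Pairwise (· < ·) :=
    ((PySem.List.sorted_pairwise folders (fun x => x)).and hnd).imp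
      (fun h => lt_of_le_of_ne h.1 h.2)
  rw [mem_fold_outer]
  constructor
  · rintro (h1 | ⟨_, hi⟩)
    · rw [mem_fold_comb] at h1
      rcases h1 with h | ⟨f1, f2, hpmem, hne, hin, rfl⟩
      · simp [PySem.Set.empty] at h
      · rw [PySem.List.mem_combinations_iff] at hpmem
        have hps := (pair_sublist_iff hlt f1 f).mp hpmem.1
        exact Or.inr ⟨f1, hperm.mem_iff.mp hps.1, hps.2.2, hin⟩
    · exact Or.inl hi
  · rintro (hi | ⟨g, hg, hglt, hgin⟩)
    · exact Or.inr ⟨hmem, hi⟩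
    · refine Or.inl ?_
      rw [mem_fold_comb]
      refine Or.inr ⟨g, f, ?_, ne_of_lt hglt, hgin, rfl⟩
      rw [PySem.List.mem_combinations_iff]
      exact ⟨(pair_sublist_iff hlt g f).mpr
        ⟨hperm.mem_iff.mpr hg, hperm.mem_iff.mpr hmem, hglt⟩, rfl⟩

-- ===== VERDICT (by name: the statement is the Claim_ definition above) =====
theorem get_min_folders_spec : Claim_equal_get_min_folders := by
  intro folders included _ hpre
  obtain ⟨hf, _⟩ := hpre
  show get_min_folders folders included = get_min_folders_alt folders included
  show PySem.Set.union
      (PySem.Set.diff folders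
        (folders.foldl
          (fun ex f1 =>
            included.foldl (fun ex f2 => if PySem.Str.isIn f2 f1 then PySem.Set.add ex f1 else ex) ex)
          ((PySem.List.combinations (PySem.List.sorted folders (fun x => x)) 2).foldl
            (fun ex p =>
              match p with
              | [f1, f2] => if f1 ≠ f2 ∧ PySem.Str.isIn f1 f2 then PySem.Set.add ex f2 else ex
              | _ => ex)
            PySem.Set.empty))) included =
    PySem.Set.union
      (PySem.Set.ofList (folders.filter (fun f =>
        PySem.Set.contains
          (PySem.Set.ofList
            ((PySem.List.sorted folders (fun x => x)).foldl
              (fun basal f =>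
                if included.any (fun i => PySem.Str.isIn i f) then basal
                else if basal.any (fun b => PySem.Str.isIn b f) then basal
                else basal ++ [f])
              [])) f))) included
  rw [PySem.Set.ofList_eq_self_of_nodup _ (hf.filter _)]
  congr 1
  simp only [PySem.Set.diff]
  apply List.filter_congr
  intro f hmemf
  have hA := mem_exclude folders included hf f hmemf
  rw [← PySem.Set.contains_iff] at hA
  have hB :
      PySem.Set.contains
        (PySem.Set.ofList
          ((PySem.List.sorted folders (fun x => x)).foldl
            (fun basal f =>
              if included.any (fun i => PySem.Str.isIn i f) then basal
              else if basal.any (fun b => PySem.Str.isIn b f) then basal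
              else basal ++ [f])
            [])) f = true ↔ pvKeep folders included f := by
    rw [PySem.Set.contains_iff, PySem.Set.mem_ofList, mem_basal folders included hf]
    simp [hmemf]
  rw [Bool.eq_iff_iff, Bool.not_eq_true', Bool.eq_false_iff, Ne, hA, hB]
  unfold pvKeep
  exact not_or
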